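-- pv_equiv track=rewrite | github.com/tf1993614/SuperSCC | SuperSCC/feature_selection/feature_selection.py | reverse_rank_weight
-- ===== SOURCE A (Python) =====
-- def reverse_rank_weight(x):
--     """
--     A function to reverse rank weight to makre sure the greatest ranking value representing the most importance.
--     """
--     assert isinstance(x, dict), "x should be dictionary"
--     unique_values = list(set(x.values()))
--     unique_values.sort()
--     half_length = int(len(unique_values) / 2)
--
--     d = dict()
--
--     for key, value in x.items():
--         if value > unique_values[half_length]:
--             for i in range(-1, -half_length-1, -1):
--                 if unique_values[i] == value:
--                     j = i + (i * -2) - 1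
--                     d[key] = unique_values[j]
--
--         else:
--             for i in range(half_length+1):
--                 if unique_values[i] == value:
--                     j = i + 1
--                     d[key] = unique_values[-j]
--     return d
-- ===== SOURCE B (Python) =====
-- def reverse_rank_weight(x):
--     """
--     A function to reverse rank weight to makre sure the greatest ranking value representing the most importance.
--     """
--     assert isinstance(x, dict), "x should be dictionary"
--     unique = sorted(set(x.values()))
--     mirror = dict(zip(unique, reversed(unique)))
--     return {k: mirror[v] for k, v in x.items()}
-- ===== Notes on version B (the rewrite author's own statement) =====
-- stated objective: faster
-- what changed: Replaced A's per-key scan over unique_values with its two half-length index-arithmetic branches by a mirror dictionary built once from zip(unique, reversed(unique)) and a single hash lookup per key.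
import Mathlib
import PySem

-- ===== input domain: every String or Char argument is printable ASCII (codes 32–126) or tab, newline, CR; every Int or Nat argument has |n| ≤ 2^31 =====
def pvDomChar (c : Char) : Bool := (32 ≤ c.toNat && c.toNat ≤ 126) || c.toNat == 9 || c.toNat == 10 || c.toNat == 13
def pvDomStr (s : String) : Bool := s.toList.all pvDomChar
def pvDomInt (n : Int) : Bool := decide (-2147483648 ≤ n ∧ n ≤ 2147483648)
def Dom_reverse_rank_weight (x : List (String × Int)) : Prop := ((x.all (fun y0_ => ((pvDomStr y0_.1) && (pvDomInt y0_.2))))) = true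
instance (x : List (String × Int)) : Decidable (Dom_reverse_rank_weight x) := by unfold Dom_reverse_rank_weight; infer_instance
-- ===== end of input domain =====

-- B replaces A's per-key scan of unique_values (with its two half-length branches) by one mirror
-- dictionary built from zip(unique, reversed(unique)), then a single lookup per key (same return value).

-- ===== PORT A =====
def reverse_rank_weight (x : List (String × Int)) : List (String × Int) :=
  let xd := PySem.Dict.ofList x
  let unique_values := PySem.List.sorted (PySem.Set.ofList xd.values) (fun v => v)
  let half_length : Nat := unique_values.length / 2
  let d := xd.items.foldl (fun d kv =>
    -- Python: `if value > unique_values[half_length]`; `none` = IndexError, unreachable (the loop runs only if xd is nonempty, and then unique_values ≠ [])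
    match PySem.List.pyGet? unique_values (half_length : Int) with
    | none => d
    | some m =>
      if kv.2 > m then
        (PySem.List.pyRange (-1) (-(half_length : Int) - 1) (-1)).foldl (fun d i =>
          if PySem.List.pyGet? unique_values i = some kv.2 then
            -- j = i + (i * -2) - 1; u[j]; `none` = IndexError, unreachable
            match PySem.List.pyGet? unique_values (i + i * (-2) - 1) with
            | some w => d.insert kv.1 w
            | none => d
          else d) d
      else
        (PySem.List.pyRange 0 ((half_length : Int) + 1)).foldl (fun d i =>
          if PySem.List.pyGet? unique_values i = some kv.2 then
            -- j = i + 1; u[-j]; `none` = IndexError, unreachable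
            match PySem.List.pyGet? unique_values (-(i + 1)) with
            | some w => d.insert kv.1 w
            | none => d
          else d) d)
    PySem.Dict.empty
  d.items

-- ===== PORT B =====
def reverse_rank_weight_alt (x : List (String × Int)) : List (String × Int) :=
  let xd := PySem.Dict.ofList x
  let unique := PySem.List.sorted (PySem.Set.ofList xd.values) (fun v => v)
  let mirror := PySem.Dict.ofList (unique.zip unique.reverse)
  (xd.items.foldl (fun d kv =>
    -- Python: mirror[v]; `none` = KeyError, unreachable (every value of xd is a key of mirror)
    match mirror.get? kv.2 with
    | some w => d.insert kv.1 w
    | none => d) PySem.Dict.empty).items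

-- ===== PRECONDITION & SPEC =====
def Spec_reverse_rank_weight (x : List (String × Int)) (out : List (String × Int)) : Prop := out = reverse_rank_weight_alt x
instance (x : List (String × Int)) (out : List (String × Int)) : Decidable (Spec_reverse_rank_weight x out) := by unfold Spec_reverse_rank_weight; infer_instance

-- ===== CLAIM (what is proved, stated in full; the proofs are below) =====
def Claim_equal_reverse_rank_weight : Prop := ∀ (x : List (String × Int)), Dom_reverse_rank_weight x → Spec_reverse_rank_weight x (reverse_rank_weight x)

-- ===== LEMMAS AND PROOFS =====

-- a guarded fold whose guard never fires leaves the accumulator unchanged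
lemma foldl_guard_skip {α β : Type} (l : List α) (c : α → Prop) [DecidablePred c]
    (g : α → β → β) (d : β) (h : ∀ i ∈ l, ¬ c i) :
    l.foldl (fun d i => if c i then g i d else d) d = d := by
  induction l generalizing d with
  | nil => rfl
  | cons a t ih =>
    simp only [List.foldl_cons, if_neg (h a (by simp))]
    exact ih d (fun i hi => h i (by simp [hi]))

-- a guarded fold whose guard fires exactly once applies that single step
lemma foldl_guard_single {α β : Type} (l : List α) (c : α → Prop) [DecidablePred c]
    (g : α → β → β) (i0 : α) (d : β) (hmem : i0 ∈ l)
    (h : ∀ i ∈ l, c i ↔ i = i0) (hnd : l.Nodup) :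
    l.foldl (fun d i => if c i then g i d else d) d = g i0 d := by
  induction l generalizing d with
  | nil => cases hmem
  | cons a t ih =>
    rcases List.mem_cons.mp hmem with rfl | hm
    · simp only [List.foldl_cons, if_pos ((h i0 (by simp)).mpr rfl)]
      exact foldl_guard_skip t c g _
        (fun i hi hc => (List.nodup_cons.mp hnd).1 (((h i (List.mem_cons_of_mem _ hi)).mp hc) ▸ hi))
    · have ha : ¬ c a := fun hc => by
        have := (h a (by simp)).mp hc
        subst this
        exact (List.nodup_cons.mp hnd).1 hm
      simp only [List.foldl_cons, if_neg ha]
      exact ih d hm (fun i hi => h i (List.mem_cons_of_mem _ hi)) (List.nodup_cons.mp hnd).2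

-- in a strictly increasing list, positions with equal entries coincide
lemma pairwise_lt_getElem_inj (u : List Int) (hu : u.Pairwise (· < ·)) {m n : Nat}
    (hm : m < u.length) (hn : n < u.length) (h : u[m] = u[n]) : m = n := by
  rcases lt_trichotomy m n with hlt | he | hgt
  · have := List.pairwise_iff_getElem.mp hu m n hm hn hlt; omega
  · exact he
  · have := List.pairwise_iff_getElem.mp hu n m hn hm hgt; omega

-- B's side: the mirror dict maps the n-th smallest unique value to the n-th largest
lemma mirror_get (u : List Int) (hu : u.Pairwise (· < ·)) (n : Nat) (hn : n < u.length) :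
    (PySem.Dict.ofList (u.zip u.reverse)).get? (u[n]'hn) =
      some (u[u.length - 1 - n]'(by omega)) := by
  have hnd : u.Nodup := hu.imp (fun h => ne_of_lt h)
  have hitems : (PySem.Dict.ofList (u.zip u.reverse)).items = u.zip u.reverse := by
    have hfresh : ∀ a ∈ u.zip u.reverse,
        (PySem.Dict.empty : PySem.Dict Int Int).contains (Prod.fst a) = false := by
      intro a _; simp [PySem.Dict.contains_empty]
    have hk : ((u.zip u.reverse).map Prod.fst).Nodup := by
      rw [List.map_fst_zip (by simp)]; exact hnd
    have := PySem.Dict.items_foldl_insert_fresh (u.zip u.reverse) Prod.fst Prod.snd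
      PySem.Dict.empty hfresh hk
    simpa using this
  apply PySem.Dict.get?_of_mem_items
  · rw [hitems]
    have hz : n < (u.zip u.reverse).length := by simp; omega
    have hg : (u.zip u.reverse)[n]'hz = (u[n]'hn, u[u.length - 1 - n]'(by omega)) := by
      rw [List.getElem_zip]
      exact congrArg _ (List.getElem_reverse _)
    exact hg ▸ List.getElem_mem hz
  · exact PySem.Dict.nodup_keys_ofList _

-- A's side: the per-key branch-and-scan body computes the same mirrored value
lemma a_step (u : List Int) (hu : u.Pairwise (· < ·)) (n : Nat) (hn : n < u.length)
    (key : String) (d : PySem.Dict String Int) :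
    (match PySem.List.pyGet? u ((u.length / 2 : Nat) : Int) with
     | none => d
     | some m =>
       if (u[n]'hn) > m then
         (PySem.List.pyRange (-1) (-((u.length / 2 : Nat) : Int) - 1) (-1)).foldl (fun d i =>
           if PySem.List.pyGet? u i = some (u[n]'hn) then
             match PySem.List.pyGet? u (i + i * (-2) - 1) with
             | some w => d.insert key w
             | none => d
           else d) d
       else
         (PySem.List.pyRange 0 (((u.length / 2 : Nat) : Int) + 1)).foldl (fun d i =>
           if PySem.List.pyGet? u i = some (u[n]'hn) then
             match PySem.List.pyGet? u (-(i + 1)) with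
             | some w => d.insert key w
             | none => d
           else d) d)
    = d.insert key (u[u.length - 1 - n]'(by omega)) := by
  have hhl : u.length / 2 < u.length := Nat.div_lt_self (by omega) (by omega)
  have hget : PySem.List.pyGet? u ((u.length / 2 : Nat) : Int) = some (u[u.length / 2]'hhl) := by
    rw [PySem.List.pyGet?_natCast]
    exact List.getElem?_eq_getElem hhl
  rw [hget]
  simp only []
  by_cases hgt : (u[n]'hn) > u[u.length / 2]'hhl
  · rw [if_pos hgt]
    have hnhl : u.length / 2 < n := by
      rcases lt_trichotomy n (u.length / 2) with hlt | he | h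
      · have := List.pairwise_iff_getElem.mp hu n (u.length / 2) hn hhl hlt; omega
      · subst he; omega
      · exact h
    refine (foldl_guard_single _
        (fun i => PySem.List.pyGet? u i = some (u[n]'hn))
        (fun i d => match PySem.List.pyGet? u (i + i * (-2) - 1) with
                    | some w => d.insert key w
                    | none => d)
        ((n : Int) - u.length) d ?_ ?_ ?_).trans ?_
    · exact PySem.List.mem_pyRange_neg_one.mpr (by constructor <;> omega)
    · intro i hi
      have hib := PySem.List.mem_pyRange_neg_one.mp hi
      have hneg : PySem.List.pyGet? u i = u[u.length - (-i).toNat]? :=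
        PySem.List.pyGet?_neg u (by omega) (by omega)
      show PySem.List.pyGet? u i = some (u[n]'hn) ↔ i = (n : Int) - u.length
      constructor
      · intro hc
        rw [hneg] at hc
        have hlt : u.length - (-i).toNat < u.length := by omega
        rw [List.getElem?_eq_getElem hlt] at hc
        have := pairwise_lt_getElem_inj u hu hlt hn (Option.some.inj hc)
        omega
      · rintro rfl
        rw [hneg]
        have hidx : u.length - (-((n : Int) - u.length)).toNat = n := by omega
        rw [hidx, List.getElem?_eq_getElem hn]
    · rw [PySem.List.pyRange_neg_one_eq_reverse]
      exact List.nodup_reverse.mpr (PySem.List.nodup_pyRange_one _ _)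
    · have harg : ((n : Int) - u.length) + ((n : Int) - u.length) * (-2) - 1
          = ((u.length - 1 - n : Nat) : Int) := by omega
      simp only [harg, PySem.List.pyGet?_natCast, List.getElem?_eq_getElem (by omega : u.length - 1 - n < u.length)]
  · rw [if_neg hgt]
    have hnhl : n ≤ u.length / 2 := by
      by_contra h
      have := List.pairwise_iff_getElem.mp hu (u.length / 2) n hhl hn (by omega)
      omega
    refine (foldl_guard_single _
        (fun i => PySem.List.pyGet? u i = some (u[n]'hn))
        (fun i d => match PySem.List.pyGet? u (-(i + 1)) with
                    | some w => d.insert key w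
                    | none => d)
        (n : Int) d ?_ ?_ ?_).trans ?_
    · exact PySem.List.mem_pyRange_one.mpr (by constructor <;> omega)
    · intro i hi
      have hib := PySem.List.mem_pyRange_one.mp hi
      have hpos : PySem.List.pyGet? u i = u[i.toNat]? :=
        PySem.List.pyGet?_of_nonneg_of_lt u (by omega) (by omega)
      show PySem.List.pyGet? u i = some (u[n]'hn) ↔ i = (n : Int)
      constructor
      · intro hc
        rw [hpos] at hc
        have hlt : i.toNat < u.length := by omega
        rw [List.getElem?_eq_getElem hlt] at hc
        have := pairwise_lt_getElem_inj u hu hlt hn (Option.some.inj hc)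
        omega
      · rintro rfl
        rw [hpos]
        have hidx : ((n : Int)).toNat = n := by omega
        rw [hidx, List.getElem?_eq_getElem hn]
    · exact PySem.List.nodup_pyRange_one _ _
    · have hneg : PySem.List.pyGet? u (-((n : Int) + 1))
          = some (u[u.length - 1 - n]'(by omega)) := by
        rw [PySem.List.pyGet?_neg u (by omega) (by omega),
          show u.length - (-(-((n : Int) + 1))).toNat = u.length - 1 - n from by omega]
        exact List.getElem?_eq_getElem (by omega)
      simp only [hneg]

-- the two folds agree item by item
lemma main_eq (x : List (String × Int)) : reverse_rank_weight x = reverse_rank_weight_alt x := by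
  simp only [reverse_rank_weight, reverse_rank_weight_alt]
  apply congrArg PySem.Dict.items
  apply PySem.List.foldl_congr_mem
  intro acc kv hkv
  have hu : (PySem.List.sorted (PySem.Set.ofList (PySem.Dict.ofList x).values)
      (fun v => v)).Pairwise (· < ·) :=
    PySem.List.sorted_ofList_pairwise_lt _
  have hmem : kv.2 ∈ PySem.List.sorted (PySem.Set.ofList (PySem.Dict.ofList x).values)
      (fun v => v) := by
    rw [PySem.List.mem_sorted, PySem.Set.mem_ofList]
    simp only [PySem.Dict.values]
    exact List.mem_map_of_mem hkv
  obtain ⟨n, hn, hnv⟩ := List.mem_iff_getElem.mp hmem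
  rw [← hnv]
  rw [a_step _ hu n hn kv.1 acc, mirror_get _ hu n hn]

-- ===== VERDICT (by name: the statement is the Claim_ definition above) =====
theorem reverse_rank_weight_spec : Claim_equal_reverse_rank_weight := by
  intro x _
  exact main_eq x
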